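-- pv_equiv track=rewrite | github.com/Baronlegend27/CS481-Project | Prefilewrite.py | most_common_number
-- ===== SOURCE A (Python) =====
-- def most_common_number(lst):
--     if not lst:
--         return None  # Return None if the list is empty
--
--     # Dictionary to hold the frequency of each number
--     frequency = {}
--
--     # Count the frequency of each number in the list
--     for num in lst:
--         if num in frequency:
--             frequency[num] += 1
--         else:
--             frequency[num] = 1
--
--     # Find the maximum frequency
--     max_frequency = max(frequency.values())
--
--     # Collect all numbers with the maximum frequency
--     most_common = [num for num, count in frequency.items() if count == max_frequency]
--
--     # Return the smallest number among the most common
--     return min(most_common)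
-- ===== SOURCE B (Python) =====
-- def most_common_number(lst):
--     # one online pass: maintain running counts and the running winner under the
--     # key (higher count so far, then smaller value); no max/filter/min passes
--     counts = {}
--     best = None
--     best_count = 0
--     for x in lst:
--         c = counts.get(x, 0) + 1
--         counts[x] = c
--         if best is None or c > best_count or (c == best_count and x < best):
--             best = x
--             best_count = c
--     return best
-- ===== Notes on version B (the rewrite author's own statement) =====
-- stated objective: alternative
-- what changed: Replaces A's four-pass pipeline (build a count dict, max over its values, filter out the argmax set, min over it) by a single online pass that updates the counts and a running winner (best value, best count) at once, with the tie rule 'equal count and smaller value wins'.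
import Mathlib
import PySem

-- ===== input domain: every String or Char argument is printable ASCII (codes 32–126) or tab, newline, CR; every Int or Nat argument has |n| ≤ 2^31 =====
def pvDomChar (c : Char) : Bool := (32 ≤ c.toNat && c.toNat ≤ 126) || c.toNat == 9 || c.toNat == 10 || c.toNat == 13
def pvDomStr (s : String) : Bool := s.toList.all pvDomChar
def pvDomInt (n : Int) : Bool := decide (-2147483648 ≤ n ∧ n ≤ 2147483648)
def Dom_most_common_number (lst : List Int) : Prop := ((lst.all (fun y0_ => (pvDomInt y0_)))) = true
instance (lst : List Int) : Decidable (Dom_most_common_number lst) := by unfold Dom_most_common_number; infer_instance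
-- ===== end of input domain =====

-- B replaces A's four-pass pipeline (count dict, max of values, filter the argmax set, min)
-- by a single online pass keeping running counts and the running winner; same return value.


-- ===== PORT A =====
-- one counting-loop step: 'if num in frequency: frequency[num] += 1 else: frequency[num] = 1'
def pvAStep (d : PySem.Dict Int Int) (num : Int) : PySem.Dict Int Int :=
  if d.contains num then d.insert num (d.getD num 0 + 1) else d.insert num 1

def most_common_number (lst : List Int) : Option Int :=
  if lst = [] then none
  else
    let frequency := lst.foldl pvAStep PySem.Dict.empty
    match PySem.List.max? frequency.values (fun v => v) with
    | none => none   -- unreachable: max() over the nonempty values never raises here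
    | some max_frequency =>
      let most_common := (frequency.items.filter (fun p => p.2 == max_frequency)).map (fun p => p.1)
      PySem.List.min? most_common (fun x => x)

-- ===== PORT B =====
-- one loop step of Source B: state = (counts, best, best_count)
def pvBStep (st : PySem.Dict Int Int × Option Int × Int) (x : Int) :
    PySem.Dict Int Int × Option Int × Int :=
  let c := st.1.getD x 0 + 1
  let counts := st.1.insert x c
  match st.2.1 with
  | none => (counts, some x, c)
  | some b =>
    if c > st.2.2 ∨ (c = st.2.2 ∧ x < b) then (counts, some x, c) else (counts, some b, st.2.2)

def most_common_number_alt (lst : List Int) : Option Int :=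
  (lst.foldl pvBStep (PySem.Dict.empty, none, 0)).2.1

-- ===== PRECONDITION & SPEC =====
def Spec_most_common_number (lst : List Int) (out : Option Int) : Prop := out = most_common_number_alt lst
instance (lst : List Int) (out : Option Int) : Decidable (Spec_most_common_number lst out) := by unfold Spec_most_common_number; infer_instance

-- ===== CLAIM (what is proved, stated in full; the proofs are below) =====
def Claim_equal_most_common_number : Prop := ∀ (lst : List Int), Dom_most_common_number lst → Spec_most_common_number lst (most_common_number lst)

-- ===== LEMMAS AND PROOFS =====

-- the common characterisation: b is an element of lst of maximal multiplicity,
-- and the smallest such element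
def IsBest (lst : List Int) (b : Int) : Prop :=
  b ∈ lst ∧ ∀ y ∈ lst,
    List.count y lst < List.count b lst ∨
    (List.count y lst = List.count b lst ∧ b ≤ y)

theorem isBest_unique {lst : List Int} {b b' : Int}
    (h : IsBest lst b) (h' : IsBest lst b') : b = b' := by
  obtain ⟨hm, hb⟩ := h
  obtain ⟨hm', hb'⟩ := h'
  rcases hb b' hm' with h1 | h1 <;> rcases hb' b hm with h2 | h2 <;> omega

-- B's loop invariant: after processing the prefix p, the state holds Counter(p),
-- the best element of p so far, and its multiplicity
def InvB (p : List Int) (st : PySem.Dict Int Int × Option Int × Int) : Prop :=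
  st.1 = PySem.Dict.counter p ∧
  ((st.2.1 = none ∧ p = []) ∨
    ∃ m, st.2.1 = some m ∧ IsBest p m ∧ st.2.2 = (List.count m p : Int))

theorem counter_snoc (p : List Int) (x : Int) :
    PySem.Dict.counter (p ++ [x]) =
      (PySem.Dict.counter p).insert x ((PySem.Dict.counter p).getD x 0 + 1) := by
  have h1 := PySem.Dict.foldl_insert_getD_add_one_eq_counter (p ++ [x])
  rw [List.foldl_append, PySem.Dict.foldl_insert_getD_add_one_eq_counter] at h1
  simpa using h1.symm

theorem invB_step (p : List Int) (d : PySem.Dict Int Int) (ob : Option Int) (bc x : Int)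
    (h : InvB p (d, ob, bc)) : InvB (p ++ [x]) (pvBStep (d, ob, bc) x) := by
  obtain ⟨hd, hrest⟩ := h
  replace hd : d = PySem.Dict.counter p := hd
  have hcnt : ∀ y : Int, List.count y (p ++ [x]) = List.count y p + (if x = y then 1 else 0) := by
    intro y
    rw [List.count_append]
    simp [List.count_singleton]
  have hc : d.getD x 0 = (List.count x p : Int) := by
    rw [hd]; exact PySem.Dict.getD_counter p x
  have hcounts : d.insert x (d.getD x 0 + 1) = PySem.Dict.counter (p ++ [x]) := by
    rw [hd]; exact (counter_snoc p x).symm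
  rcases hrest with ⟨hob, hp⟩ | ⟨b, hob, hbest, hbc⟩
  · replace hob : ob = none := hob
    subst hob; subst hp
    refine ⟨hcounts, Or.inr ⟨x, rfl, ⟨by simp, ?_⟩, ?_⟩⟩
    · intro y hy
      simp at hy
      subst hy
      exact Or.inr ⟨rfl, le_refl _⟩
    · show d.getD x 0 + 1 = (List.count x [x] : Int)
      rw [hc]
      simp
  · replace hob : ob = some b := hob
    replace hbc : bc = (List.count b p : Int) := hbc
    subst hob
    obtain ⟨hbm, hbALL⟩ := hbest
    simp only [pvBStep]
    split_ifs with hfire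
    · -- the new element becomes the running winner
      rw [hc] at hfire
      have h3 : List.count x (p ++ [x]) = List.count x p + 1 := by simp [hcnt x]
      refine ⟨hcounts, Or.inr ⟨x, rfl, ⟨by simp, ?_⟩, ?_⟩⟩
      · intro y hy
        rcases List.mem_append.mp hy with hy' | hy'
        · by_cases hxy : x = y
          · subst hxy
            exact Or.inr ⟨rfl, le_refl _⟩
          · have h1 := hbALL y hy'
            have h2 : List.count y (p ++ [x]) = List.count y p := by simp [hcnt y, hxy]
            omega
        · simp at hy'
          subst hy'
          exact Or.inr ⟨rfl, le_refl _⟩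
      · show d.getD x 0 + 1 = (List.count x (p ++ [x]) : Int)
        rw [hc]
        omega
    · -- the previous winner is kept
      rw [hc] at hfire
      have hxb : x ≠ b := by
        intro hxb
        subst hxb
        omega
      have h3 : List.count x (p ++ [x]) = List.count x p + 1 := by simp [hcnt x]
      have h4 : List.count b (p ++ [x]) = List.count b p := by simp [hcnt b, hxb]
      refine ⟨hcounts, Or.inr ⟨b, rfl, ⟨by simp [hbm], ?_⟩, ?_⟩⟩
      · intro y hy
        rcases List.mem_append.mp hy with hy' | hy'
        · by_cases hxy : x = y
          · subst hxy
            omega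
          · have h1 := hbALL y hy'
            have h2 : List.count y (p ++ [x]) = List.count y p := by simp [hcnt y, hxy]
            omega
        · simp at hy'
          subst hy'
          omega
      · show (bc : Int) = (List.count b (p ++ [x]) : Int)
        omega

theorem invB_foldl : ∀ (l p : List Int) (st : PySem.Dict Int Int × Option Int × Int),
    InvB p st → InvB (p ++ l) (l.foldl pvBStep st) := by
  intro l
  induction l with
  | nil => intro p st h; simpa using h
  | cons x t ih =>
    intro p st h
    obtain ⟨d, ob, bc⟩ := st
    rw [List.foldl_cons, ← List.singleton_append, ← List.append_assoc]
    exact ih (p ++ [x]) _ (invB_step p d ob bc x h)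

theorem B_isBest {lst : List Int} (h : lst ≠ []) :
    ∃ b, most_common_number_alt lst = some b ∧ IsBest lst b := by
  have h0 : InvB [] (PySem.Dict.empty, none, 0) := ⟨rfl, Or.inl ⟨rfl, rfl⟩⟩
  have hinv := invB_foldl lst [] _ h0
  rw [List.nil_append] at hinv
  obtain ⟨-, hrest⟩ := hinv
  rcases hrest with ⟨-, hp⟩ | ⟨m, hm, hbest, -⟩
  · exact absurd hp h
  · exact ⟨m, hm, hbest⟩

-- A's counting loop is exactly Counter(lst)
theorem freq_eq (lst : List Int) :
    lst.foldl pvAStep PySem.Dict.empty = PySem.Dict.counter lst := by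
  have hstep : pvAStep = fun (d : PySem.Dict Int Int) x => d.insert x (d.getD x 0 + 1) := by
    funext d x
    unfold pvAStep
    split_ifs with h
    · rfl
    · have hg : d.get? x = none := by
        rw [PySem.Dict.contains_eq_isSome_get?] at h
        cases hx : d.get? x with
        | none => rfl
        | some v => rw [hx] at h; simp at h
      have h0 : d.getD x 0 = 0 := by simp [PySem.Dict.getD, hg]
      rw [h0]
      norm_num
  rw [hstep, PySem.Dict.foldl_insert_getD_add_one_eq_counter]

theorem A_isBest {lst : List Int} (h : lst ≠ []) :
    ∃ b, most_common_number lst = some b ∧ IsBest lst b := by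
  have hA : most_common_number lst =
      match PySem.List.max? (PySem.Dict.counter lst).values (fun v => v) with
      | none => none
      | some mf =>
          PySem.List.min?
            (((PySem.Dict.counter lst).items.filter (fun p => p.2 == mf)).map (fun p => p.1))
            (fun x => x) := by
    unfold most_common_number
    rw [if_neg h, freq_eq]
  -- the values list
  have hvals : (PySem.Dict.counter lst).values =
      (PySem.Set.ofList lst).map (fun k => ((List.count k lst : Int))) := by
    simp [PySem.Dict.values, PySem.Dict.items_counter, List.map_map, Function.comp_def]
  obtain ⟨z, t, rfl⟩ := List.exists_cons_of_ne_nil h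
  have hzmem : z ∈ PySem.Set.ofList (z :: t) := (PySem.Set.mem_ofList _ _).mpr (by simp)
  have hvne : (PySem.Dict.counter (z :: t)).values ≠ [] := by
    rw [hvals]
    intro hc
    rw [List.map_eq_nil_iff] at hc
    rw [hc] at hzmem
    simp at hzmem
  cases hmax : PySem.List.max? (PySem.Dict.counter (z :: t)).values (fun v => v) with
  | none => exact absurd ((PySem.List.max?_eq_none_iff _ _).mp hmax) hvne
  | some maxf =>
    -- the candidate list
    have hmc : ((PySem.Dict.counter (z :: t)).items.filter (fun p => p.2 == maxf)).map
        (fun p => p.1) =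
        (PySem.Set.ofList (z :: t)).filter (fun k => ((List.count k (z :: t) : Int)) == maxf) := by
      rw [PySem.Dict.items_counter, List.filter_map, List.map_map]
      simp [Function.comp_def]
    set cand := (PySem.Set.ofList (z :: t)).filter
      (fun k => ((List.count k (z :: t) : Int)) == maxf) with hcand
    -- maxf is attained
    have hmem := PySem.List.max?_mem hmax
    rw [hvals] at hmem
    obtain ⟨k0, hk0mem, hk0⟩ := List.mem_map.mp hmem
    have hk0cand : k0 ∈ cand := by
      rw [hcand, List.mem_filter]
      exact ⟨hk0mem, by simp [hk0]⟩
    have hcne : cand ≠ [] := fun hc => by rw [hc] at hk0cand; simp at hk0cand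
    cases hmin : PySem.List.min? cand (fun x => x) with
    | none => exact absurd ((PySem.List.min?_eq_none_iff _ _).mp hmin) hcne
    | some m =>
      refine ⟨m, ?_, ?_, ?_⟩
      · rw [hA, hmax]
        show PySem.List.min?
          (((PySem.Dict.counter (z :: t)).items.filter (fun p => p.2 == maxf)).map
            (fun p => p.1)) (fun x => x) = some m
        rw [hmc]
        exact hmin
      · have := PySem.List.min?_mem hmin
        rw [hcand, List.mem_filter] at this
        exact (PySem.Set.mem_ofList _ _).mp this.1
      · intro y hy
        have hmmem := PySem.List.min?_mem hmin
        rw [hcand, List.mem_filter] at hmmem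
        have hmmax : ((List.count m (z :: t) : Int)) = maxf := by
          have := hmmem.2; simpa using this
        have hymax : ((List.count y (z :: t) : Int)) ≤ maxf := by
          have hyv : ((List.count y (z :: t) : Int)) ∈ (PySem.Dict.counter (z :: t)).values := by
            rw [hvals]
            exact List.mem_map.mpr ⟨y, (PySem.Set.mem_ofList _ _).mpr hy, rfl⟩
          exact PySem.List.max?_isMax hmax _ hyv
        rcases eq_or_lt_of_le hymax with heq | hlt
        · right
          constructor
          · omega
          · have hycand : y ∈ cand := by
              rw [hcand, List.mem_filter]
              exact ⟨(PySem.Set.mem_ofList _ _).mpr hy, by simp [heq]⟩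
            exact PySem.List.min?_isMin hmin y hycand
        · left; omega

-- ===== VERDICT (by name: the statement is the Claim_ definition above) =====
theorem most_common_number_spec : Claim_equal_most_common_number := by
  intro lst _
  unfold Spec_most_common_number
  by_cases h : lst = []
  · subst h; rfl
  · obtain ⟨a, ha, hba⟩ := A_isBest h
    obtain ⟨b, hb, hbb⟩ := B_isBest h
    rw [ha, hb, isBest_unique hba hbb]
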